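-- pv_equiv track=rewrite | github.com/uhatikus/useful-py-codes | insta_followers_analysis/insta.py | find_all_similar_usernames
-- ===== SOURCE A (Python) =====
-- def levenshtein_distance(s1, s2):
--     if len(s1) < len(s2):
--         return levenshtein_distance(s2, s1)
--
--     if len(s2) == 0:
--         return len(s1)
--
--     previous_row = range(len(s2) + 1)
--     for i, c1 in enumerate(s1):
--         current_row = [i + 1]
--         for j, c2 in enumerate(s2):
--             insertions = previous_row[j + 1] + 1
--             deletions = current_row[j] + 1
--             substitutions = previous_row[j] + (c1 != c2)
--             current_row.append(min(insertions, deletions, substitutions))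
--         previous_row = current_row
--
--     return previous_row[-1]
--
-- def find_all_similar_usernames(unfollowed, followed, threshold=4):
--     similar_usernames_pairs = []
--
--     for i, username1 in enumerate(unfollowed):
--         for j, username2 in enumerate(followed):
--             distance = levenshtein_distance(username1, username2)
--             if distance <= threshold:
--                 similar_usernames_pairs.append((username1, username2))
--
--     return similar_usernames_pairs
-- ===== SOURCE B (Python) =====
-- def _lev(s, t):
--     # Top-down memoized recursion on prefix pairs (keyed by prefix lengths),
--     # with the classical equal-last-character shortcut.
--     memo = {}
--
--     def d(s1, t1):
--         key = (len(s1), len(t1))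
--         if key in memo:
--             return memo[key]
--         if not s1:
--             r = len(t1)
--         elif not t1:
--             r = len(s1)
--         elif s1[-1] == t1[-1]:
--             r = d(s1[:-1], t1[:-1])
--         else:
--             r = 1 + min(d(s1[:-1], t1), d(s1, t1[:-1]), d(s1[:-1], t1[:-1]))
--         memo[key] = r
--         return r
--
--     return d(s, t)
--
--
-- def find_all_similar_usernames(unfollowed, followed, threshold=4):
--     return [(u, f)
--             for u in unfollowed
--             for f in followed
--             if abs(len(u) - len(f)) <= threshold and _lev(u, f) <= threshold]
-- ===== Notes on version B (the rewrite author's own statement) =====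
-- stated objective: alternative
-- what changed: A computes each distance with an iterative bottom-up row-by-row Wagner-Fischer DP (fresh row list per character, after a swap-to-the-longer recursion); B computes it by top-down recursion on string prefix pairs memoized in a dictionary keyed by prefix lengths, taking the equal-last-character shortcut, and assembles the pairs with a length-difference-prefiltered comprehension.
import Mathlib
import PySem

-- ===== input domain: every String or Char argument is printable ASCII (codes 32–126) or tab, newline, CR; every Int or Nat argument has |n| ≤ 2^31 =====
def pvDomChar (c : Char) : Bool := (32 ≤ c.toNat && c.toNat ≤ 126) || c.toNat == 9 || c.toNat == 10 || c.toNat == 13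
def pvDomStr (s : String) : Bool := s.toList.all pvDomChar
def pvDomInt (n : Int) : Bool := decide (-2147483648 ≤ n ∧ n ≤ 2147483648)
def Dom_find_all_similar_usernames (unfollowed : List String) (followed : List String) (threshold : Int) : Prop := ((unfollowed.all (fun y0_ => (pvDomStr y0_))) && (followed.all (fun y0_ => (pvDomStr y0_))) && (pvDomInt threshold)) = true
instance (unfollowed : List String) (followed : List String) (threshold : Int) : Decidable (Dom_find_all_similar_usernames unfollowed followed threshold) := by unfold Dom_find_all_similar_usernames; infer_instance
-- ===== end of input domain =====

-- B replaces A's iterative bottom-up row-by-row Levenshtein DP by a top-down recursion on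
-- string prefix pairs memoized in a dictionary keyed by prefix lengths, with the classical
-- equal-last-character shortcut and a length-difference prefilter; same return value.

-- ===== PORT A =====
def pvDelta (a b : Char) : Nat := if a ≠ b then 1 else 0

-- inner loop of levenshtein_distance: walks s2 and previous_row (from index j) with
-- left = current_row[j]; appends min(insertions, deletions, substitutions)
def pvInnerA (c1 : Char) : List Char → List Nat → Nat → List Nat
  | c2 :: q, pj :: restp, left =>
      let v := Nat.min (restp.headD 0 + 1) (Nat.min (left + 1) (pj + pvDelta c1 c2))
      v :: pvInnerA c1 q restp v
  | _, _, _ => []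

-- outer loop: for i, c1 in enumerate(s1): current_row = [i+1] ++ inner; previous_row = current_row
def pvOuterA (s2 : List Char) : List Char → Nat → List Nat → List Nat
  | [], _, prev => prev
  | c1 :: rest, i, prev => pvOuterA s2 rest (i + 1) ((i + 1) :: pvInnerA c1 s2 prev (i + 1))

-- levenshtein_distance after the one possible argument swap (then len s1 ≥ len s2, so no further swap)
def pvLevBody (s1 s2 : List Char) : Nat :=
  if s2.length = 0 then s1.length
  else (pvOuterA s2 s1 0 (List.range (s2.length + 1))).getLastD 0

def pvLevA (s1 s2 : List Char) : Nat :=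
  if s1.length < s2.length then pvLevBody s2 s1 else pvLevBody s1 s2

def find_all_similar_usernames (unfollowed : List String) (followed : List String) (threshold : Int) : List (String × String) :=
  unfollowed.foldl (fun acc username1 =>
    followed.foldl (fun acc2 username2 =>
      if ((pvLevA username1.toList username2.toList : Int) ≤ threshold) then
        acc2 ++ [(username1, username2)]
      else acc2) acc) []

-- ===== PORT B =====
-- the memoized recursion d(s1, t1) of _lev: memo keyed by (len(s1), len(t1)), result threaded
-- with the updated memo; s1[-1] is ported as getLastD (exact: the branch is guarded by s1 ≠ []).
def pvD (s t : List Char) (memo : PySem.Dict (Int × Int) Nat) :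
    Nat × PySem.Dict (Int × Int) Nat :=
  match memo.get? (((s.length : Int), (t.length : Int))) with
  | some r => (r, memo)
  | none =>
      let p : Nat × PySem.Dict (Int × Int) Nat :=
        if hs : s = [] then (t.length, memo)
        else if ht : t = [] then (s.length, memo)
        else if s.getLastD ' ' = t.getLastD ' ' then
          pvD s.dropLast t.dropLast memo
        else
          let q1 := pvD s.dropLast t memo
          let q2 := pvD s t.dropLast q1.2
          let q3 := pvD s.dropLast t.dropLast q2.2
          (1 + Nat.min q1.1 (Nat.min q2.1 q3.1), q3.2)
      (p.1, p.2.insert ((s.length : Int), (t.length : Int)) p.1)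
termination_by s.length + t.length
decreasing_by
  all_goals simp only [List.length_dropLast]
  all_goals try have hs' : 0 < s.length := List.length_pos_iff.mpr hs
  all_goals try have ht' : 0 < t.length := List.length_pos_iff.mpr ht
  all_goals omega

def pvLev (s t : List Char) : Nat := (pvD s t PySem.Dict.empty).1

def find_all_similar_usernames_alt (unfollowed : List String) (followed : List String) (threshold : Int) : List (String × String) :=
  unfollowed.flatMap (fun u =>
    (followed.filter (fun f =>
      decide ((((u.toList.length : Int) - f.toList.length).natAbs : Int) ≤ threshold)
        && decide ((pvLev u.toList f.toList : Int) ≤ threshold))).map (fun f => (u, f)))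

-- ===== PRECONDITION & SPEC =====
def Spec_find_all_similar_usernames (unfollowed : List String) (followed : List String) (threshold : Int) (out : List (String × String)) : Prop := out = find_all_similar_usernames_alt unfollowed followed threshold
instance (unfollowed : List String) (followed : List String) (threshold : Int) (out : List (String × String)) : Decidable (Spec_find_all_similar_usernames unfollowed followed threshold out) := by unfold Spec_find_all_similar_usernames; infer_instance

-- ===== CLAIM (what is proved, stated in full; the proofs are below) =====
def Claim_equal_find_all_similar_usernames : Prop := ∀ (unfollowed : List String) (followed : List String) (threshold : Int), Dom_find_all_similar_usernames unfollowed followed threshold → Spec_find_all_similar_usernames unfollowed followed threshold (find_all_similar_usernames unfollowed followed threshold)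

-- ===== LEMMAS AND PROOFS =====

-- reference edit distance (head recursion); both ports are proved equal to it
def levRec : List Char → List Char → Nat
  | [], t => t.length
  | _ :: s, [] => s.length + 1
  | a :: s, b :: t =>
      Nat.min (levRec s (b :: t) + 1) (Nat.min (levRec (a :: s) t + 1) (levRec s t + pvDelta a b))
termination_by s t => s.length + t.length
decreasing_by all_goals simp <;> omega

theorem pvDelta_comm (a b : Char) : pvDelta a b = pvDelta b a := by
  simp [pvDelta, ne_comm]

theorem levRec_nil_right (s : List Char) : levRec s [] = s.length := by
  cases s <;> simp [levRec]

theorem levRec_symm (s t : List Char) : levRec s t = levRec t s := by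
  induction s, t using levRec.induct with
  | case1 t => simp [levRec, levRec_nil_right]
  | case2 a s => simp [levRec, levRec_nil_right]
  | case3 a s b t ih1 ih2 ih3 =>
      simp only [levRec, ih1, ih2, ih3, pvDelta_comm a b]
      exact min_left_comm _ _ _

theorem levRec_ge_diff (s t : List Char) :
    ((s.length : Int) - t.length).natAbs ≤ levRec s t := by
  induction s, t using levRec.induct with
  | case1 t => simp [levRec]
  | case2 a s => simp [levRec]; omega
  | case3 a s b t ih1 ih2 ih3 =>
      simp only [levRec, List.length_cons, Nat.le_min]
      unfold pvDelta at ih3 ⊢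
      split_ifs at ih3 ⊢ <;>
        refine ⟨?_, ?_, ?_⟩ <;> simp only [List.length_cons] at ih1 ih2 ih3 <;> omega

-- one extra character on the right costs at most one edit
theorem levRec_le_cons_right (s : List Char) : ∀ (t : List Char) (c : Char),
    levRec s t ≤ levRec s (c :: t) + 1 := by
  induction s with
  | nil => intro t c; simp [levRec]; omega
  | cons a s' ih =>
      intro t c
      cases t with
      | nil =>
          have h1 : (((s'.length : Int)) - 1).natAbs ≤ levRec s' [c] := by
            simpa using levRec_ge_diff s' [c]
          rw [levRec_nil_right, levRec, levRec_nil_right, levRec_nil_right]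
          simp only [Nat.min_def, List.length_cons]
          split_ifs <;> omega
      | cons b t' =>
          have h1 := ih (b :: t') c
          conv_lhs => rw [levRec]
          conv_rhs => rw [levRec]
          have h2 : levRec (a :: s') (b :: t') =
              Nat.min (levRec s' (b :: t') + 1)
                (Nat.min (levRec (a :: s') t' + 1) (levRec s' t' + pvDelta a b)) := by
            rw [levRec]
          simp only [Nat.min_def] at *
          split_ifs at * <;> omega

theorem levRec_le_cons_left (s t : List Char) (c : Char) :
    levRec s t ≤ levRec (c :: s) t + 1 := by
  rw [levRec_symm s t, levRec_symm (c :: s) t]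
  exact levRec_le_cons_right t s c

-- the equal-head shortcut
theorem levRec_cons_cons_self (a : Char) (s t : List Char) :
    levRec (a :: s) (a :: t) = levRec s t := by
  have h1 := levRec_le_cons_right s t a
  have h2 := levRec_le_cons_left s t a
  rw [levRec]
  simp only [pvDelta, ne_eq, not_true_eq_false, if_false, Nat.add_zero, Nat.min_def]
  split_ifs <;> omega

-- the row the A-side DP maintains: entries levRec rp rq' for rq' = rq, then rq extended with q's chars
def specRow (rp rq q : List Char) : List Nat :=
  match q with
  | [] => [levRec rp rq]
  | c :: q' => levRec rp rq :: specRow rp (c :: rq) q'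

theorem specRow_cons_head_tail (rp rq q : List Char) :
    specRow rp rq q = levRec rp rq :: (specRow rp rq q).tail := by
  cases q <;> simp [specRow]

theorem specRow_range (q rq : List Char) :
    specRow [] rq q = (List.range (q.length + 1)).map (· + rq.length) := by
  induction q generalizing rq with
  | nil => simp [specRow, levRec]
  | cons c q' ih =>
      rw [specRow, ih (c :: rq)]
      conv_rhs => rw [show (c :: q').length + 1 = q'.length + 1 + 1 from by simp,
        List.range_succ_eq_map, List.map_cons, List.map_map]
      congr 1
      · simp [levRec]
      · apply List.map_congr_left
        intro x _
        simp only [Function.comp_apply, List.length_cons]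
        omega

theorem specRow_getLastD (q rp rq : List Char) (d : Nat) :
    (specRow rp rq q).getLastD d = levRec rp (q.reverse ++ rq) := by
  induction q generalizing rq d with
  | nil => simp [specRow]
  | cons c q' ih =>
      simp only [specRow, List.getLastD_cons, ih, List.reverse_cons, List.append_assoc,
        List.cons_append, List.nil_append]

-- ===== A's DP = levRec on the reversed strings =====
theorem innerA_spec (c1 : Char) (q : List Char) : ∀ rp rq : List Char,
    pvInnerA c1 q (specRow rp rq q) (levRec (c1 :: rp) rq) = (specRow (c1 :: rp) rq q).tail := by
  induction q with
  | nil => intro rp rq; simp [specRow, pvInnerA]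
  | cons c2 q' ih =>
      intro rp rq
      rw [specRow, specRow]
      rw [pvInnerA]
      rw [specRow_cons_head_tail rp (c2 :: rq) q']
      simp only [List.headD_cons, List.tail_cons]
      rw [← specRow_cons_head_tail rp (c2 :: rq) q']
      have hv : Nat.min (levRec rp (c2 :: rq) + 1)
          (Nat.min (levRec (c1 :: rp) rq + 1) (levRec rp rq + pvDelta c1 c2)) =
          levRec (c1 :: rp) (c2 :: rq) := by
        rw [levRec]
      rw [hv, ih rp (c2 :: rq)]
      exact (specRow_cons_head_tail (c1 :: rp) (c2 :: rq) q').symm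

theorem outerA_spec (s2 : List Char) (srem : List Char) : ∀ rp : List Char,
    pvOuterA s2 srem rp.length (specRow rp [] s2) = specRow (srem.reverse ++ rp) [] s2 := by
  induction srem with
  | nil => intro rp; simp [pvOuterA]
  | cons c1 rest ih =>
      intro rp
      rw [pvOuterA]
      have h1 : rp.length + 1 = levRec (c1 :: rp) [] := by
        rw [levRec_nil_right]; simp
      have h2 : (rp.length + 1) :: pvInnerA c1 s2 (specRow rp [] s2) (rp.length + 1) =
          specRow (c1 :: rp) [] s2 := by
        rw [h1, innerA_spec c1 s2 rp []]
        exact (specRow_cons_head_tail (c1 :: rp) [] s2).symm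
      rw [h2]
      have := ih (c1 :: rp)
      simp only [List.length_cons] at this
      rw [this]
      simp [List.reverse_cons, List.append_assoc]

theorem levBody_spec (s1 s2 : List Char) : pvLevBody s1 s2 = levRec s1.reverse s2.reverse := by
  unfold pvLevBody
  split_ifs with h
  · have : s2 = [] := List.length_eq_zero_iff.mp h
    subst this
    rw [List.reverse_nil, levRec_nil_right, List.length_reverse]
  · have hinit : List.range (s2.length + 1) = specRow [] [] s2 := by
      rw [specRow_range]; simp
    rw [hinit]
    have := outerA_spec s2 s1 []
    simp only [List.length_nil, List.append_nil] at this
    rw [this, specRow_getLastD]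
    simp

theorem levA_spec (s1 s2 : List Char) : pvLevA s1 s2 = levRec s1.reverse s2.reverse := by
  unfold pvLevA
  split_ifs with h
  · rw [levBody_spec, levRec_symm]
  · exact levBody_spec s1 s2

-- ===== B's memoized recursion = levRec on the reversed strings =====
theorem reverse_eq_getLastD_cons {l : List Char} (h : l ≠ []) (d : Char) :
    l.reverse = l.getLastD d :: l.dropLast.reverse := by
  conv_lhs => rw [← List.dropLast_append_getLast h]
  rw [List.reverse_append, List.reverse_singleton]
  simp [List.getLastD_eq_getLast?, List.getLast?_eq_some_getLast h]

theorem prefix_eq_of_length {α : Type} {s1 s2 S : List α}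
    (h1 : s1 <+: S) (h2 : s2 <+: S) (h : s1.length = s2.length) : s1 = s2 := by
  exact (List.prefix_of_prefix_length_le h1 h2 (le_of_eq h)).eq_of_length h

-- the memo invariant: every stored value is the edit distance of the (unique) prefixes
-- of S and T of that pair of lengths
def memInv (S T : List Char) (m : PySem.Dict (Int × Int) Nat) : Prop :=
  ∀ (s1 t1 : List Char), s1 <+: S → t1 <+: T →
    ∀ r, m.get? (((s1.length : Int), (t1.length : Int))) = some r →
      r = levRec s1.reverse t1.reverse

theorem pvD_spec (S T : List Char) : ∀ (n : Nat) (s1 t1 : List Char)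
    (m : PySem.Dict (Int × Int) Nat), s1.length + t1.length ≤ n →
    s1 <+: S → t1 <+: T → memInv S T m →
    (pvD s1 t1 m).1 = levRec s1.reverse t1.reverse ∧ memInv S T (pvD s1 t1 m).2 := by
  intro n
  induction n with
  | zero =>
      intro s1 t1 m hn hp hq hinv
      have hs : s1 = [] := by cases s1 <;> simp_all
      have ht : t1 = [] := by cases t1 <;> simp_all
      subst hs; subst ht
      rw [pvD]
      cases hg : m.get? (((List.length ([] : List Char) : Int),
          (List.length ([] : List Char) : Int))) with
      | some r =>
          refine ⟨(hinv [] [] (List.nil_prefix) (List.nil_prefix) r hg).symm ▸ rfl, hinv⟩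
      | none =>
          simp only [List.length_nil, List.reverse_nil, levRec]
          constructor
          · rfl
          · intro s1 t1 hp' hq' r hr
            rw [PySem.Dict.get?_insert] at hr
            split_ifs at hr with he
            · have h1 : s1 = [] := by
                have := congrArg Prod.fst he
                simp at this
                cases s1 <;> simp_all
              have h2 : t1 = [] := by
                have := congrArg Prod.snd he
                simp at this
                cases t1 <;> simp_all
              subst h1; subst h2
              simp [levRec] at hr ⊢
              omega
            · exact hinv s1 t1 hp' hq' r hr
  | succ n ih =>
      intro s1 t1 m hn hp hq hinv
      rw [pvD]
      cases hg : m.get? (((s1.length : Int), (t1.length : Int))) with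
      | some r =>
          exact ⟨(hinv s1 t1 hp hq r hg), hinv⟩
      | none =>
          -- compute the body pair and its correctness, then handle the insert
          have hbody : ∀ (p : Nat × PySem.Dict (Int × Int) Nat),
              p.1 = levRec s1.reverse t1.reverse → memInv S T p.2 →
              (p.1, p.2.insert ((s1.length : Int), (t1.length : Int)) p.1).1 =
                levRec s1.reverse t1.reverse ∧
              memInv S T
                (p.1, p.2.insert ((s1.length : Int), (t1.length : Int)) p.1).2 := by
            intro p hval hminv
            refine ⟨hval, ?_⟩
            intro s1' t1' hp' hq' r hr
            simp only at hr
            rw [PySem.Dict.get?_insert] at hr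
            split_ifs at hr with he
            · have h1 : s1' = s1 := by
                have := congrArg Prod.fst he
                simp only [Int.natCast_inj] at this
                exact prefix_eq_of_length hp' hp this
              have h2 : t1' = t1 := by
                have := congrArg Prod.snd he
                simp only [Int.natCast_inj] at this
                exact prefix_eq_of_length hq' hq this
              subst h1; subst h2
              rw [← hval]
              exact (Option.some_inj.mp hr).symm
            · exact hminv s1' t1' hp' hq' r hr
          split_ifs with hs ht hc
          · -- s1 = []
            subst hs
            exact hbody (t1.length, m) (by simp [levRec]) hinv
          · -- t1 = []
            subst ht
            exact hbody (s1.length, m)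
              (by rw [List.reverse_nil, levRec_nil_right, List.length_reverse]) hinv
          · -- equal last characters
            have hps : s1.dropLast <+: S := (List.dropLast_prefix s1).trans hp
            have hpt : t1.dropLast <+: T := (List.dropLast_prefix t1).trans hq
            have hlen : s1.dropLast.length + t1.dropLast.length ≤ n := by
              have h1 : 0 < s1.length := List.length_pos_iff.mpr hs
              simp only [List.length_dropLast]
              omega
            obtain ⟨hv, hm⟩ := ih s1.dropLast t1.dropLast m hlen hps hpt hinv
            refine hbody (pvD s1.dropLast t1.dropLast m) ?_ hm
            rw [hv]
            rw [reverse_eq_getLastD_cons hs ' ', reverse_eq_getLastD_cons ht ' ', hc]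
            exact (levRec_cons_cons_self _ _ _).symm
          · -- different last characters: three sequential recursive calls
            have hps : s1.dropLast <+: S := (List.dropLast_prefix s1).trans hp
            have hpt : t1.dropLast <+: T := (List.dropLast_prefix t1).trans hq
            have h1 : 0 < s1.length := List.length_pos_iff.mpr hs
            have h2 : 0 < t1.length := List.length_pos_iff.mpr ht
            have hl1 : s1.dropLast.length + t1.length ≤ n := by
              simp only [List.length_dropLast]; omega
            obtain ⟨hv1, hm1⟩ := ih s1.dropLast t1 m hl1 hps hq hinv
            have hl2 : s1.length + t1.dropLast.length ≤ n := by
              simp only [List.length_dropLast]; omega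
            obtain ⟨hv2, hm2⟩ := ih s1 t1.dropLast _ hl2 hp hpt hm1
            have hl3 : s1.dropLast.length + t1.dropLast.length ≤ n := by
              simp only [List.length_dropLast]; omega
            obtain ⟨hv3, hm3⟩ := ih s1.dropLast t1.dropLast _ hl3 hps hpt hm2
            refine hbody
              (1 + Nat.min (pvD s1.dropLast t1 m).1
                (Nat.min (pvD s1 t1.dropLast (pvD s1.dropLast t1 m).2).1
                  (pvD s1.dropLast t1.dropLast
                    (pvD s1 t1.dropLast (pvD s1.dropLast t1 m).2).2).1),
               (pvD s1.dropLast t1.dropLast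
                 (pvD s1 t1.dropLast (pvD s1.dropLast t1 m).2).2).2) ?_ hm3
            simp only [hv1, hv2, hv3]
            rw [reverse_eq_getLastD_cons hs ' ', reverse_eq_getLastD_cons ht ' ']
            rw [levRec]
            have hd : pvDelta (s1.getLastD ' ') (t1.getLastD ' ') = 1 := by
              simp only [pvDelta, ne_eq, hc, not_false_eq_true, if_true]
            rw [hd]
            rw [← reverse_eq_getLastD_cons hs ' ', ← reverse_eq_getLastD_cons ht ' ']
            simp only [Nat.min_def]
            split_ifs <;> omega

theorem pvLev_spec (s t : List Char) : pvLev s t = levRec s.reverse t.reverse := by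
  have hinv : memInv s t PySem.Dict.empty := by
    intro s1 t1 _ _ r hr
    simp [PySem.Dict.get?_empty] at hr
  exact (pvD_spec s t (s.length + t.length) s t PySem.Dict.empty le_rfl
    List.prefix_rfl List.prefix_rfl hinv).1

-- ===== assembly =====
theorem pair_cond (u f : List Char) (k : Int) :
    (decide ((((u.length : Int) - f.length).natAbs : Int) ≤ k)
        && decide ((pvLev u f : Int) ≤ k)) =
      decide ((pvLevA u f : Int) ≤ k) := by
  rw [pvLev_spec, levA_spec]
  by_cases h : (((u.length : Int) - f.length).natAbs : Int) ≤ k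
  · simp only [h, decide_true, Bool.true_and]
  · have hd := levRec_ge_diff u.reverse f.reverse
    simp only [List.length_reverse] at hd
    simp only [h, decide_false, Bool.false_and]
    symm
    simp only [decide_eq_false_iff_not]
    have := Int.ofNat_le.mpr hd
    omega

theorem inner_fold (fo : List String) (u : String) (k : Int) (acc : List (String × String)) :
    fo.foldl (fun acc2 f =>
        if ((pvLevA u.toList f.toList : Int) ≤ k) then acc2 ++ [(u, f)] else acc2) acc =
      acc ++ (fo.filter (fun f =>
        decide ((((u.toList.length : Int) - f.toList.length).natAbs : Int) ≤ k)
          && decide ((pvLev u.toList f.toList : Int) ≤ k))).map (fun f => (u, f)) := by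
  have h := PySem.List.foldl_append_if
    (fun f : String => decide ((pvLevA u.toList f.toList : Int) ≤ k)) (fun f => (u, f)) fo acc
  simp only [decide_eq_true_eq] at h
  rw [h]
  congr 2
  apply List.filter_congr
  intro f _
  exact (pair_cond u.toList f.toList k).symm

-- ===== VERDICT (by name: the statement is the Claim_ definition above) =====
theorem find_all_similar_usernames_spec : Claim_equal_find_all_similar_usernames := by
  intro unfollowed followed threshold _
  unfold Spec_find_all_similar_usernames find_all_similar_usernames find_all_similar_usernames_alt
  have hbody : (fun (acc : List (String × String)) (username1 : String) =>
      followed.foldl (fun acc2 username2 =>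
        if ((pvLevA username1.toList username2.toList : Int) ≤ threshold) then
          acc2 ++ [(username1, username2)]
        else acc2) acc) =
    (fun acc u => acc ++ (followed.filter (fun f =>
        decide ((((u.toList.length : Int) - f.toList.length).natAbs : Int) ≤ threshold)
          && decide ((pvLev u.toList f.toList : Int) ≤ threshold))).map (fun f => (u, f))) := by
    funext acc u
    exact inner_fold followed u threshold acc
  rw [hbody, PySem.List.foldl_append_eq_flatMap]
  simp
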